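-- pv_equiv track=rewrite | github.com/dudu-miranda/SolucoesColoracaoVertices | grasp.py | get_rcl
-- ===== SOURCE A (Python) =====
-- from itertools import islice
-- from typing import List, Dict, Iterator
--
-- def get_rcl(inv_degree: Dict[int, List[int]], degrees: List[int],
--             number: int) -> List[int]:
--     rcl = []
--     remaining = number
--     for degree in reversed(degrees):
--         rcl.extend(islice(inv_degree[degree], remaining))
--         remaining = number - len(rcl)
--         if not remaining:
--             break
--
--     return rcl
-- ===== SOURCE B (Python) =====
-- def get_rcl(inv_degree, degrees, number):
--     if number <= 0:
--         return []
--     rev = degrees[::-1]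
--     # phase 1: counting pass over bucket lengths, find the cutoff bucket k
--     k, total = 0, 0
--     while k < len(rev) and total < number:
--         total += len(inv_degree[rev[k]])
--         k += 1
--     # phase 2: concatenate whole buckets before the cutoff, slice the last one
--     out = []
--     for d in rev[:k - 1]:
--         out += inv_degree[d]
--     if k:
--         last = inv_degree[rev[k - 1]]
--         out += last[:number - (total - len(last))]
--     return out
-- ===== Notes on version B (the rewrite author's own statement) =====
-- stated objective: alternative
-- what changed: A's single incremental pass (extend by a bounded islice, update a remaining counter, break) is replaced by two staged passes: a counting pass over bucket lengths locates the cutoff bucket, then whole buckets are concatenated and only the final bucket is sliced once.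
import Mathlib
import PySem

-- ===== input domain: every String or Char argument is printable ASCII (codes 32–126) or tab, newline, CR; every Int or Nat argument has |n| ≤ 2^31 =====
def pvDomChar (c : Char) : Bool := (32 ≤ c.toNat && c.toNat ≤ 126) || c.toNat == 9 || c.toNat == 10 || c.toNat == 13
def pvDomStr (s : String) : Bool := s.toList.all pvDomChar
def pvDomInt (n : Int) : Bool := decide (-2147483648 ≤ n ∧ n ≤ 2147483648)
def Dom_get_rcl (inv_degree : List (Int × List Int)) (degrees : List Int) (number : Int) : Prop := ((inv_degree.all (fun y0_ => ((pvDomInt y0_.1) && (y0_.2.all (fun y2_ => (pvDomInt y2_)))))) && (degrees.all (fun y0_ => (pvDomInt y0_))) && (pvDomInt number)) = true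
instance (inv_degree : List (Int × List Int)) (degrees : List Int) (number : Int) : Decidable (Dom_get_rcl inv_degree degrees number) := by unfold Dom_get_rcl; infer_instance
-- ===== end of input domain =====

-- B replaces A's incremental loop (extend-by-bounded-islice with a 'remaining' counter) by two
-- staged passes: a counting pass over bucket lengths finds the cutoff bucket, then whole buckets
-- are concatenated and only the last one is sliced (alternative decomposition; same cost).
-- Equivalence is proved on Pre_: every reached degree is a key and (number ≥ 0 or degrees = []).


-- ===== PORT A =====
-- loop over reversed(degrees) with state (rcl, remaining); islice(bucket, remaining) = take remaining
-- (remaining ≥ 0 under Pre_; inv_degree[degree] via getD, the KeyError case is outside Pre_)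
def get_rcl_go (inv_degree : List (Int × List Int)) (number : Int) :
    List Int → List Int → Int → List Int
  | [], rcl, _ => rcl
  | d :: rest, rcl, remaining =>
    let rcl' := rcl ++ ((PySem.Dict.mk inv_degree).getD d []).take remaining.toNat
    let remaining' := number - rcl'.length
    if remaining' = 0 then rcl' else get_rcl_go inv_degree number rest rcl' remaining'

def get_rcl (inv_degree : List (Int × List Int)) (degrees : List Int) (number : Int) : List Int :=
  get_rcl_go inv_degree number degrees.reverse [] number

-- ===== PORT B =====
-- phase 1: the while loop counting bucket lengths; returns (k, total)
def rclCut (inv_degree : List (Int × List Int)) (number : Int) :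
    List Int → Int → Nat × Int
  | [], total => (0, total)
  | d :: rest, total =>
    if total < number then
      let p := rclCut inv_degree number rest
        (total + ((PySem.Dict.mk inv_degree).getD d []).length)
      (p.1 + 1, p.2)
    else (0, total)

-- phase 2: 'out += inv_degree[d]' over rev[:k-1] (when k = 0, rev is empty, so Nat k-1 = 0 agrees
-- with Python's rev[:-1] = []), then the single slice of the last bucket (its bound is ≥ 0 when taken)
def get_rcl_alt (inv_degree : List (Int × List Int)) (degrees : List Int) (number : Int) : List Int :=
  if number ≤ 0 then []
  else
    let rev := degrees.reverse
    let p := rclCut inv_degree number rev 0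
    let front := (rev.take (p.1 - 1)).foldl
      (fun acc d => acc ++ (PySem.Dict.mk inv_degree).getD d []) []
    if p.1 = 0 then front
    else
      let last := (PySem.Dict.mk inv_degree).getD (rev.getD (p.1 - 1) 0) []
      front ++ last.take (number - (p.2 - last.length)).toNat

-- ===== PRECONDITION & SPEC =====
-- Pre_ excludes exactly the inputs where A raises: (a) number < 0 with non-empty degrees
-- (ValueError from islice's negative count, or KeyError first), and (b) a degree of the reversed
-- list that A's loop reaches — i.e. the earlier buckets hold fewer than `number` items in total —
-- is missing from inv_degree (KeyError).
def Pre_get_rcl (inv_degree : List (Int × List Int)) (degrees : List Int) (number : Int) : Prop :=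
  (0 ≤ number ∨ degrees = []) ∧
    ∀ i, i < degrees.length →
      (i = 0 ∨ ((degrees.reverse.take i).map
          (fun d => (((PySem.Dict.mk inv_degree).getD d []).length : Int))).sum < number) →
      ((PySem.Dict.mk inv_degree).get? (degrees.reverse.getD i 0)).isSome
instance (inv_degree : List (Int × List Int)) (degrees : List Int) (number : Int) : Decidable (Pre_get_rcl inv_degree degrees number) := by unfold Pre_get_rcl; infer_instance

def pvWitness_get_rcl : (List (Int × List Int)) × List Int × Int :=
  ([(1, [10, 20]), (2, [30])], [2, 1], 2)

def Spec_get_rcl (inv_degree : List (Int × List Int)) (degrees : List Int) (number : Int) (out : List Int) : Prop := out = get_rcl_alt inv_degree degrees number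
instance (inv_degree : List (Int × List Int)) (degrees : List Int) (number : Int) (out : List Int) : Decidable (Spec_get_rcl inv_degree degrees number out) := by unfold Spec_get_rcl; infer_instance

-- ===== CLAIM (what is proved, stated in full; the proofs are below) =====
def Claim_equal_get_rcl : Prop := ∀ (inv_degree : List (Int × List Int)) (degrees : List Int) (number : Int), Dom_get_rcl inv_degree degrees number → Pre_get_rcl inv_degree degrees number → Spec_get_rcl inv_degree degrees number (get_rcl inv_degree degrees number)

-- ===== LEMMAS AND PROOFS =====

-- A's loop invariant: with remaining = number - rcl.length ≥ 0, the loop computes the accumulator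
-- followed by a bounded take of the flattened remaining buckets.
theorem get_rcl_go_eq (inv_degree : List (Int × List Int)) (number : Int) :
    ∀ (ds rcl : List Int), (rcl.length : Int) ≤ number →
      get_rcl_go inv_degree number ds rcl (number - rcl.length) =
        rcl ++ (ds.flatMap (fun d => (PySem.Dict.mk inv_degree).getD d [])).take
          (number - rcl.length).toNat := by
  intro ds
  induction ds with
  | nil => intro rcl h; simp [get_rcl_go]
  | cons d rest ih =>
    intro rcl h
    simp only [get_rcl_go, List.flatMap_cons, List.take_append]
    set b := (PySem.Dict.mk inv_degree).getD d [] with hb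
    set r : Int := number - rcl.length with hr
    have hr0 : 0 ≤ r := by omega
    set rcl' := rcl ++ b.take r.toNat with hrcl'
    have hlen : rcl'.length = rcl.length + min r.toNat b.length := by
      simp [hrcl']
    by_cases hz : number - (rcl'.length : Int) = 0
    · -- break: list is full, nothing is taken from the rest
      rw [if_pos hz]
      have hmin : min r.toNat b.length = r.toNat := by omega
      have h2 : r.toNat - b.length = 0 := by omega
      have h3 : (rest.flatMap (fun d => (PySem.Dict.mk inv_degree).getD d [])).take
          (r.toNat - b.length) = [] := by rw [h2]; simp
      rw [h3, List.append_nil, hrcl']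
    · rw [if_neg hz]
      have hle : (rcl'.length : Int) ≤ number := by
        have : min r.toNat b.length ≤ r.toNat := Nat.min_le_left _ _
        omega
      have := ih rcl' hle
      rw [this]
      have hmin : min r.toNat b.length = b.length := by omega
      have h2 : (number - (rcl'.length : Int)).toNat = r.toNat - b.length := by omega
      rw [h2, hrcl', List.append_assoc]

-- B's phases, packaged let-free for the induction (proof-only helper; get_rcl_alt's body
-- reduces to it definitionally)
def altBody (inv_degree : List (Int × List Int)) (number : Int)
    (rev : List Int) (total : Int) : List Int :=
  if (rclCut inv_degree number rev total).1 = 0 then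
    (rev.take ((rclCut inv_degree number rev total).1 - 1)).foldl
      (fun acc d => acc ++ (PySem.Dict.mk inv_degree).getD d []) []
  else
    (rev.take ((rclCut inv_degree number rev total).1 - 1)).foldl
      (fun acc d => acc ++ (PySem.Dict.mk inv_degree).getD d []) [] ++
    ((PySem.Dict.mk inv_degree).getD (rev.getD ((rclCut inv_degree number rev total).1 - 1) 0) []).take
      (number - ((rclCut inv_degree number rev total).2 -
        ((PySem.Dict.mk inv_degree).getD (rev.getD ((rclCut inv_degree number rev total).1 - 1) 0) []).length)).toNat

theorem get_rcl_alt_eq_altBody (inv_degree : List (Int × List Int)) (degrees : List Int)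
    (number : Int) :
    get_rcl_alt inv_degree degrees number =
      if number ≤ 0 then [] else altBody inv_degree number degrees.reverse 0 := rfl

-- B's two phases compute a bounded take of the flattened buckets
theorem altBody_eq (inv_degree : List (Int × List Int)) (number : Int) :
    ∀ (rev : List Int) (total : Int), total < number →
      altBody inv_degree number rev total =
        (rev.flatMap (fun d => (PySem.Dict.mk inv_degree).getD d [])).take
          (number - total).toNat := by
  intro rev
  induction rev with
  | nil => intro total h; simp [altBody, rclCut]
  | cons d rest ih =>
    intro total h
    set b := (PySem.Dict.mk inv_degree).getD d [] with hb
    set total' : Int := total + b.length with htotal'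
    rcases hkt : rclCut inv_degree number rest total' with ⟨k, t⟩
    have hcut : rclCut inv_degree number (d :: rest) total = (k + 1, t) := by
      simp [rclCut, if_pos h, ← htotal', ← hb, hkt]
    unfold altBody
    rw [hcut]
    simp only [Nat.add_sub_cancel, Nat.succ_ne_zero, if_false]
    by_cases h' : total' < number
    · cases rest with
      | nil =>
        -- the single bucket is shorter than what is asked: both sides are the whole bucket
        obtain ⟨hk, ht⟩ : k = 0 ∧ t = total' := by
          have h0 : rclCut inv_degree number [] total' = (0, total') := by simp [rclCut]
          rw [hkt] at h0; injection h0 with h1 h2; exact ⟨h1, h2⟩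
        subst hk; subst ht
        have hge : b.length ≤ (number - total).toNat := by omega
        have hsl : (number - (total' - (b.length : Int))).toNat = (number - total).toNat := by
          omega
        simp only [List.take_zero, List.foldl_nil, List.nil_append, List.getD_cons_zero,
          ← hb, hsl, List.flatMap_cons, List.flatMap_nil, List.append_nil]
      | cons e rs =>
        -- the cutoff lies further in: peel the whole bucket b off both sides
        have hk1 : 1 ≤ k := by
          have : rclCut inv_degree number (e :: rs) total' =
              ((rclCut inv_degree number rs
                  (total' + ((PySem.Dict.mk inv_degree).getD e []).length)).1 + 1,
               (rclCut inv_degree number rs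
                  (total' + ((PySem.Dict.mk inv_degree).getD e []).length)).2) := by
            simp [rclCut, if_pos h']
          rw [hkt] at this; injection this with h1 _; omega
        have hih := ih total' h'
        unfold altBody at hih
        rw [hkt] at hih
        simp only [if_neg (by omega : ¬ k = 0)] at hih
        rw [PySem.List.foldl_append_eq_flatMap, List.nil_append] at hih
        have htk : (d :: e :: rs).take k = d :: (e :: rs).take (k - 1) := by
          cases k with
          | zero => omega
          | succ m => simp
        have hget : (d :: e :: rs).getD k 0 = (e :: rs).getD (k - 1) 0 := by
          cases k with
          | zero => omega
          | succ m => simp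
        rw [htk, hget, List.foldl_cons, List.nil_append,
          PySem.List.foldl_append_eq_flatMap, ← hb, List.append_assoc, hih]
        have hlb : b.length ≤ (number - total).toNat := by omega
        have h2 : (number - total).toNat - b.length = (number - total').toNat := by omega
        rw [show (d :: e :: rs).flatMap (fun d => (PySem.Dict.mk inv_degree).getD d []) =
              b ++ (e :: rs).flatMap (fun d => (PySem.Dict.mk inv_degree).getD d []) from by
            rw [List.flatMap_cons, ← hb],
          List.take_append, List.take_of_length_le hlb, h2]
    · -- the cutoff is this bucket: k = 0, the slice bound number - total is ≤ |b|
      obtain ⟨hk, ht⟩ : k = 0 ∧ t = total' := by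
        have h0 : rclCut inv_degree number rest total' = (0, total') := by
          cases rest with
          | nil => simp [rclCut]
          | cons e rs => simp [rclCut, if_neg h']
        rw [hkt] at h0; injection h0 with h1 h2; exact ⟨h1, h2⟩
      subst hk; subst ht
      have hle : (number - total).toNat ≤ b.length := by omega
      have hsl : (number - (total' - (b.length : Int))).toNat = (number - total).toNat := by omega
      simp only [List.take_zero, List.foldl_nil, List.nil_append, List.getD_cons_zero,
        ← hb, hsl, List.flatMap_cons, List.take_append, Nat.sub_eq_zero_of_le hle,
        List.take_zero, List.append_nil]

theorem get_rcl_spec_aux (inv_degree : List (Int × List Int)) (degrees : List Int)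
    (number : Int) (hpre : Pre_get_rcl inv_degree degrees number) :
    get_rcl inv_degree degrees number = get_rcl_alt inv_degree degrees number := by
  obtain ⟨hnum, _⟩ := hpre
  rw [get_rcl_alt_eq_altBody]
  rcases hnum with hnn | hempty
  · have h0 : (([] : List Int).length : Int) ≤ number := by simp; omega
    have hA := get_rcl_go_eq inv_degree number degrees.reverse [] h0
    simp only [List.length_nil, Int.natCast_zero, sub_zero] at hA
    unfold get_rcl
    rw [hA]
    by_cases h : number ≤ 0
    · have h00 : number = 0 := le_antisymm h hnn
      simp [h00]
    · rw [if_neg h, altBody_eq inv_degree number degrees.reverse 0 (by omega)]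
      simp
  · subst hempty
    unfold get_rcl
    by_cases h : number ≤ 0
    · simp [get_rcl_go, h]
    · rw [if_neg h, altBody_eq _ _ _ 0 (by omega)]
      simp [get_rcl_go]

-- ===== VERDICT (by name: the statement is the Claim_ definition above) =====
theorem get_rcl_spec : Claim_equal_get_rcl := by
  intro inv_degree degrees number _ hpre
  exact get_rcl_spec_aux inv_degree degrees number hpre
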